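-- pv_equiv track=rewrite | github.com/Mahmoudmetwall2y/information-theory-app | codec.py | hamming_7_4_decode_no_correction
-- ===== SOURCE A (Python) =====
-- from typing import Dict, List, Tuple, Optional
--
-- def _bitstr_to_int_list(bits: str) -> List[int]:
--     return [1 if b == "1" else 0 for b in bits]
--
-- def _int_list_to_bitstr(bits: List[int]) -> str:
--     return "".join("1" if b else "0" for b in bits)
--
-- def hamming_7_4_decode_no_correction(encoded_bits: str, pad_bits: int) -> str:
--     if not encoded_bits:
--         return ""
--
--     if len(encoded_bits) % 7 != 0:
--         raise ValueError("Hamming(7,4) encoded length must be multiple of 7.")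
--
--     bits = _bitstr_to_int_list(encoded_bits)
--     data_bits: List[int] = []
--
--     for i in range(0, len(bits), 7):
--         b1, b2, b3, b4, b5, b6, b7 = bits[i:i + 7]
--         data_bits.extend([b3, b5, b6, b7])
--
--     if pad_bits > 0:
--         data_bits = data_bits[:-pad_bits]
--
--     return _int_list_to_bitstr(data_bits)
-- ===== SOURCE B (Python) =====
-- def hamming_7_4_decode_no_correction(encoded_bits: str, pad_bits: int) -> str:
--     if not encoded_bits:
--         return ""
--     if len(encoded_bits) % 7 != 0:
--         raise ValueError("Hamming(7,4) encoded length must be multiple of 7.")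
--     data = ["1" if c == "1" else "0"
--             for j, c in enumerate(encoded_bits) if j % 7 in (2, 4, 5, 6)]
--     if pad_bits > 0:
--         data = data[:-pad_bits]
--     return "".join(data)
-- ===== Notes on version B (the rewrite author's own statement) =====
-- stated objective: simpler
-- what changed: Replaces block slicing with 7-tuple unpacking and the int-list helper conversions by one flat enumerate pass keeping characters whose index mod 7 is a data position, joined directly.
import Mathlib
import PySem

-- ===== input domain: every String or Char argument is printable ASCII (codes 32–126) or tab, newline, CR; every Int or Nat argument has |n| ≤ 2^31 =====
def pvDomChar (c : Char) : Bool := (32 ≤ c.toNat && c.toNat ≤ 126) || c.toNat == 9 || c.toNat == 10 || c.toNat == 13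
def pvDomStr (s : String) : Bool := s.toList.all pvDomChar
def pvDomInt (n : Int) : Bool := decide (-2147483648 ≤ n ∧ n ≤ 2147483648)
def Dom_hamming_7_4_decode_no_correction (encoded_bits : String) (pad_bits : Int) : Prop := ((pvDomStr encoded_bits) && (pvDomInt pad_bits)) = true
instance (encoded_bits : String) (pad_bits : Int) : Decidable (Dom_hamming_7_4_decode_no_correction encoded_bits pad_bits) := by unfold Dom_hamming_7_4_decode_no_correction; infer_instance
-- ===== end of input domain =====

-- B replaces A's 7-bit block slicing/unpacking and int-list helper conversions by one flat
-- enumerate-filter pass keeping characters at positions with index mod 7 ∈ {2,4,5,6}; simpler, same cost.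

-- ===== PORT A =====
-- [1 if b == "1" else 0 for b in bits]
def pvBitstrToIntList (bits : List Char) : List Int :=
  bits.map (fun b => if b == '1' then (1 : Int) else 0)

-- "".join("1" if b else "0" for b in bits)  (join of one-char strings = string of those chars)
def pvIntListToBitstr (bits : List Int) : String :=
  String.ofList (bits.map (fun b => if b ≠ 0 then '1' else '0'))

def hamming_7_4_decode_no_correction (encoded_bits : String) (pad_bits : Int) : String :=
  if encoded_bits.toList = [] then ""
  else if PySem.Int.mod (PySem.Str.len encoded_bits) 7 ≠ 0 then ""  -- raise ValueError (excluded by Pre_)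
  else
    let bits := pvBitstrToIntList encoded_bits.toList
    -- for i in range(0, len(bits), 7): b1,…,b7 = bits[i:i+7]; data_bits.extend([b3,b5,b6,b7])
    let data_bits :=
      (PySem.List.pyRange 0 ((bits.length : Int)) 7).foldl
        (fun acc i =>
          match PySem.List.slice bits (some i) (some (i + 7)) with
          | [_, _, b3, _, b5, b6, b7] => acc ++ [b3, b5, b6, b7]
          | _ => acc)   -- an unpack of ≠ 7 values would raise; unreachable when length % 7 = 0
        []
    let data_bits := if pad_bits > 0 then PySem.List.slice data_bits none (some (-pad_bits)) else data_bits
    pvIntListToBitstr data_bits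

-- ===== PORT B =====
def hamming_7_4_decode_no_correction_alt (encoded_bits : String) (pad_bits : Int) : String :=
  if encoded_bits.toList = [] then ""
  else if PySem.Int.mod (PySem.Str.len encoded_bits) 7 ≠ 0 then ""  -- raise ValueError (excluded by Pre_)
  else
    -- ["1" if c == "1" else "0" for j, c in enumerate(encoded_bits) if j % 7 in (2, 4, 5, 6)]
    let data : List Char :=
      ((PySem.List.enumerate encoded_bits.toList).filter
          (fun p => [2, 4, 5, 6].contains (PySem.Int.mod p.1 7))).map
        (fun p => if p.2 == '1' then '1' else '0')
    let data := if pad_bits > 0 then PySem.List.slice data none (some (-pad_bits)) else data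
    String.ofList data  -- "".join(data), a list of one-char strings

-- ===== PRECONDITION & SPEC =====
-- Pre_ excludes exactly the inputs where A raises ValueError (length not a multiple of 7).
def Pre_hamming_7_4_decode_no_correction (encoded_bits : String) (pad_bits : Int) : Prop :=
  encoded_bits.toList.length % 7 = 0

instance (encoded_bits : String) (pad_bits : Int) : Decidable (Pre_hamming_7_4_decode_no_correction encoded_bits pad_bits) := by unfold Pre_hamming_7_4_decode_no_correction; infer_instance

def pvWitness_hamming_7_4_decode_no_correction : String × Int := ("0110100", 1)

def Spec_hamming_7_4_decode_no_correction (encoded_bits : String) (pad_bits : Int) (out : String) : Prop := out = hamming_7_4_decode_no_correction_alt encoded_bits pad_bits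
instance (encoded_bits : String) (pad_bits : Int) (out : String) : Decidable (Spec_hamming_7_4_decode_no_correction encoded_bits pad_bits out) := by unfold Spec_hamming_7_4_decode_no_correction; infer_instance

-- ===== CLAIM (what is proved, stated in full; the proofs are below) =====
def Claim_equal_hamming_7_4_decode_no_correction : Prop := ∀ (encoded_bits : String) (pad_bits : Int), Dom_hamming_7_4_decode_no_correction encoded_bits pad_bits → Pre_hamming_7_4_decode_no_correction encoded_bits pad_bits → Spec_hamming_7_4_decode_no_correction encoded_bits pad_bits (hamming_7_4_decode_no_correction encoded_bits pad_bits)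

-- ===== LEMMAS AND PROOFS =====

-- the data bits of the 7-bit blocks, as a structural recursion both ports are reduced to
def pvABlocks : List Int → List Int
  | _ :: _ :: b3 :: _ :: b5 :: b6 :: b7 :: rest => b3 :: b5 :: b6 :: b7 :: pvABlocks rest
  | _ => []

def pvBBlocks : List Char → List Char
  | _ :: _ :: c3 :: _ :: c5 :: c6 :: c7 :: rest =>
      (if c3 == '1' then '1' else '0') :: (if c5 == '1' then '1' else '0') ::
      (if c6 == '1' then '1' else '0') :: (if c7 == '1' then '1' else '0') :: pvBBlocks rest
  | _ => []

theorem pvBridge (l : List Char) :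
    pvBBlocks l = (pvABlocks (pvBitstrToIntList l)).map (fun b => if b ≠ 0 then '1' else '0') := by
  induction l using pvBBlocks.induct with
  | case1 c1 c2 c3 c4 c5 c6 c7 rest ih =>
      simp only [pvBBlocks, pvBitstrToIntList, List.map, pvABlocks, ih]
      by_cases h3 : c3 == '1' <;> by_cases h5 : c5 == '1' <;> by_cases h6 : c6 == '1' <;>
        by_cases h7 : c7 == '1' <;> simp [h3, h5, h6, h7]
  | case2 l h =>
      rcases l with _|⟨a,_|⟨b,_|⟨c,_|⟨d,_|⟨e,_|⟨f,_|⟨g,rest⟩⟩⟩⟩⟩⟩⟩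
      · rfl
      · rfl
      · rfl
      · rfl
      · rfl
      · rfl
      · rfl
      · exact (h a b c d e f g rest rfl).elim

theorem pvModShift (s : Int) : PySem.Int.mod (s + 7) 7 = PySem.Int.mod s 7 := by
  rw [PySem.Int.mod_eq_emod_of_pos (by norm_num), PySem.Int.mod_eq_emod_of_pos (by norm_num)]
  omega

theorem pvShift (l : List Char) (s : Int) :
    (PySem.List.enumerate l (s + 7)).filter
        (fun p => [2, 4, 5, 6].contains (PySem.Int.mod p.1 7))
      = ((PySem.List.enumerate l s).filter
          (fun p => [2, 4, 5, 6].contains (PySem.Int.mod p.1 7))).map (fun p => (p.1 + 7, p.2)) := by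
  induction l generalizing s with
  | nil => simp [PySem.List.enumerate_nil]
  | cons c rest ih =>
      rw [PySem.List.enumerate_cons, PySem.List.enumerate_cons]
      simp only [List.filter_cons, pvModShift s]
      have : s + 7 + 1 = (s + 1) + 7 := by ring
      rw [this, ih (s + 1)]
      split_ifs <;> simp

theorem pvLB (K : Nat) (l : List Char) (h : l.length = 7 * K) :
    ((PySem.List.enumerate l).filter
        (fun p => [2, 4, 5, 6].contains (PySem.Int.mod p.1 7))).map
      (fun p => if p.2 == '1' then '1' else '0') = pvBBlocks l := by
  induction K generalizing l with
  | zero =>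
      rcases l with _ | ⟨c, t⟩
      · rfl
      · simp at h
  | succ K ih =>
      rcases l with _|⟨c1,_|⟨c2,_|⟨c3,_|⟨c4,_|⟨c5,_|⟨c6,_|⟨c7,rest⟩⟩⟩⟩⟩⟩⟩ <;> simp at h <;> try omega
      have hr : rest.length = 7 * K := by omega
      have htail : ((PySem.List.enumerate rest (0 + 7)).filter
            (fun p => [2, 4, 5, 6].contains (PySem.Int.mod p.1 7))).map
          (fun p => if p.2 == '1' then '1' else '0') = pvBBlocks rest := by
        rw [pvShift, List.map_map]; exact ih rest hr
      norm_num at htail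
      simp only [PySem.List.enumerate_cons, List.filter_cons]
      norm_num [pvBBlocks]
      rw [htail]

theorem pvLA' (K : Nat) (bits : List Int) (h : bits.length = 7 * K) (acc : List Int) :
    (List.range K).foldl
        (fun acc (k : Nat) =>
          match PySem.List.slice bits (some (0 + 7 * (k : Int))) (some (0 + 7 * (k : Int) + 7)) with
          | [_, _, b3, _, b5, b6, b7] => acc ++ [b3, b5, b6, b7]
          | _ => acc) acc
      = acc ++ pvABlocks bits := by
  induction K generalizing bits acc with
  | zero =>
      rcases bits with _ | ⟨b, t⟩
      · simp [pvABlocks]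
      · simp at h
  | succ K ih =>
      rcases bits with _|⟨b1,_|⟨b2,_|⟨b3,_|⟨b4,_|⟨b5,_|⟨b6,_|⟨b7,rest⟩⟩⟩⟩⟩⟩⟩ <;> simp at h <;> try omega
      have hr : rest.length = 7 * K := by omega
      rw [List.range_succ_eq_map, List.foldl_cons, List.foldl_map]
      have hhead : PySem.List.slice (b1::b2::b3::b4::b5::b6::b7::rest)
          (some (0 + 7 * ((0:Nat) : Int))) (some (0 + 7 * ((0:Nat) : Int) + 7))
          = [b1, b2, b3, b4, b5, b6, b7] := by
        have e1 : (0 + 7 * ((0:Nat) : Int)) = ((0:Nat) : Int) := by push_cast; try ring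
        have e2 : (0 + 7 * ((0:Nat) : Int) + 7) = ((0:Nat) : Int) + ((7:Nat) : Int) := by push_cast; try ring
        rw [e2, e1, PySem.List.slice_natCast_add]
        rfl
      have hstep : (fun (acc : List Int) (k : Nat) =>
          match PySem.List.slice (b1::b2::b3::b4::b5::b6::b7::rest)
              (some (0 + 7 * ((k+1 : Nat) : Int))) (some (0 + 7 * ((k+1 : Nat) : Int) + 7)) with
          | [_, _, b3, _, b5, b6, b7] => acc ++ [b3, b5, b6, b7]
          | _ => acc)
        = (fun (acc : List Int) (k : Nat) =>
          match PySem.List.slice rest (some (0 + 7 * (k : Int))) (some (0 + 7 * (k : Int) + 7)) with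
          | [_, _, b3, _, b5, b6, b7] => acc ++ [b3, b5, b6, b7]
          | _ => acc) := by
        funext acc k
        have e1 : (0 + 7 * ((k+1 : Nat) : Int)) = ((7*k+7 : Nat) : Int) := by push_cast; try ring
        have e2 : (0 + 7 * ((k+1 : Nat) : Int) + 7) = ((7*k+7 : Nat) : Int) + ((7:Nat) : Int) := by push_cast; try ring
        have e3 : (0 + 7 * (k : Int)) = ((7*k : Nat) : Int) := by push_cast; try ring
        have e4 : (0 + 7 * (k : Int) + 7) = ((7*k : Nat) : Int) + ((7:Nat) : Int) := by push_cast; try ring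
        rw [e2, e1, e4, e3, PySem.List.slice_natCast_add, PySem.List.slice_natCast_add]
        have : List.drop (7*k+7) (b1::b2::b3::b4::b5::b6::b7::rest) = List.drop (7*k) rest := by
          have : 7*k+7 = 7+7*k := by omega
          rw [this, ← List.drop_drop]
          rfl
        rw [this]
      rw [hhead]
      simp only [hstep]
      rw [ih rest hr, pvABlocks]
      simp

theorem pvLA (K : Nat) (bits : List Int) (h : bits.length = 7 * K) (acc : List Int) :
    (PySem.List.pyRange 0 ((bits.length : Int)) 7).foldl
        (fun acc i =>
          match PySem.List.slice bits (some i) (some (i + 7)) with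
          | [_, _, b3, _, b5, b6, b7] => acc ++ [b3, b5, b6, b7]
          | _ => acc) acc
      = acc ++ pvABlocks bits := by
  rw [PySem.List.pyRange_of_pos 0 ((bits.length : Int)) (by norm_num)]
  have hN : (if (0:Int) < (bits.length : Int) then
      (((bits.length : Int) - 0 + 7 - 1) / 7).toNat else 0) = K := by
    rw [h]; split_ifs <;> omega
  rw [hN, List.foldl_map]
  exact pvLA' K bits h acc

-- ===== VERDICT (by name: the statement is the Claim_ definition above) =====
theorem hamming_7_4_decode_no_correction_spec : Claim_equal_hamming_7_4_decode_no_correction := by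
  intro e pad _hDom hPre
  unfold Spec_hamming_7_4_decode_no_correction
  unfold hamming_7_4_decode_no_correction hamming_7_4_decode_no_correction_alt
  by_cases hnil : e.toList = []
  · simp [hnil]
  · simp only [hnil, if_false]
    have hPre' : e.toList.length % 7 = 0 := hPre
    have hmod : PySem.Int.mod (PySem.Str.len e) 7 = 0 := by
      rw [PySem.Str.len_eq]
      rw [show ((7:Int)) = ((7:Nat):Int) from rfl, PySem.Int.mod_natCast, hPre']
      rfl
    simp only [hmod, ne_eq, not_true_eq_false, if_false]
    obtain ⟨K, hK⟩ : ∃ K, e.toList.length = 7 * K := ⟨e.toList.length / 7, by omega⟩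
    have hbitsLen : (pvBitstrToIntList e.toList).length = 7 * K := by
      simp [pvBitstrToIntList, hK]
    rw [pvLA K (pvBitstrToIntList e.toList) hbitsLen []]
    rw [pvLB K e.toList hK, pvBridge]
    simp only [List.nil_append]
    by_cases hpad : pad > 0
    · simp only [hpad, if_true]
      obtain ⟨k, hk, hkpos⟩ : ∃ k : Nat, pad = (k : Int) ∧ 0 < k :=
        ⟨pad.toNat, by omega, by omega⟩
      rw [hk, show (-(k:Int)) = -((k:Nat):Int) from rfl]
      rw [PySem.List.slice_to_neg_natCast _ k hkpos,
          PySem.List.slice_to_neg_natCast _ k hkpos]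
      unfold pvIntListToBitstr
      rw [List.map_take]
      simp
    · simp only [hpad, if_false]
      rfl
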